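-- pv_equiv track=rewrite | github.com/gabriel-2802/Algorithms | algorithms_techniques/dp/dp_podm_count.py | gigel_fence
-- ===== SOURCE A (Python) =====
-- def gigel_fence(n: int) -> int:
-- 	MOD = 1009
--
-- 	if n <= 3:
-- 		return 1
-- 	if n == 4:
-- 		return 2
--
-- 	dp = [0] * (n + 1)
-- 	# dp[i] -> number of fences of length i and height 4
-- 	dp[1] = dp[2] = dp[3] = 1
-- 	dp[4] = 2
--
-- 	# Iterate over the lengths of fences
-- 	for i in range(5, n + 1):
-- 		# Calculate the number of fences of length i and height 4
-- 		dp[i] = (dp[i - 1] + dp[i - 4]) % MOD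
--
-- 	return dp[n]
-- ===== SOURCE B (Python) =====
-- def gigel_fence(n: int) -> int:
--     MOD = 1009
--
--     if n <= 3:
--         return 1
--     if n == 4:
--         return 2
--
--     def mul(X, Y):
--         x00, x01, x02, x03, x10, x11, x12, x13, \
--             x20, x21, x22, x23, x30, x31, x32, x33 = X
--         y00, y01, y02, y03, y10, y11, y12, y13, \
--             y20, y21, y22, y23, y30, y31, y32, y33 = Y
--         return ((x00*y00 + x01*y10 + x02*y20 + x03*y30) % MOD,
--                 (x00*y01 + x01*y11 + x02*y21 + x03*y31) % MOD,
--                 (x00*y02 + x01*y12 + x02*y22 + x03*y32) % MOD,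
--                 (x00*y03 + x01*y13 + x02*y23 + x03*y33) % MOD,
--                 (x10*y00 + x11*y10 + x12*y20 + x13*y30) % MOD,
--                 (x10*y01 + x11*y11 + x12*y21 + x13*y31) % MOD,
--                 (x10*y02 + x11*y12 + x12*y22 + x13*y32) % MOD,
--                 (x10*y03 + x11*y13 + x12*y23 + x13*y33) % MOD,
--                 (x20*y00 + x21*y10 + x22*y20 + x23*y30) % MOD,
--                 (x20*y01 + x21*y11 + x22*y21 + x23*y31) % MOD,
--                 (x20*y02 + x21*y12 + x22*y22 + x23*y32) % MOD,
--                 (x20*y03 + x21*y13 + x22*y23 + x23*y33) % MOD,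
--                 (x30*y00 + x31*y10 + x32*y20 + x33*y30) % MOD,
--                 (x30*y01 + x31*y11 + x32*y21 + x33*y31) % MOD,
--                 (x30*y02 + x31*y12 + x32*y22 + x33*y32) % MOD,
--                 (x30*y03 + x31*y13 + x32*y23 + x33*y33) % MOD)
--
--     # Companion matrix of f(i) = f(i-1) + f(i-4) (mod 1009), flattened row-major.
--     M = (1, 0, 0, 1,
--          1, 0, 0, 0,
--          0, 1, 0, 0,
--          0, 0, 1, 0)
--     R = (1, 0, 0, 0,
--          0, 1, 0, 0,
--          0, 0, 1, 0,
--          0, 0, 0, 1)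
--     e = n - 4
--     while e:
--         if e & 1:
--             R = mul(R, M)
--         M = mul(M, M)
--         e >>= 1
--     # R = companion^(n-4); state vector (f(4), f(3), f(2), f(1)) = (2, 1, 1, 1)
--     return (R[0] * 2 + R[1] + R[2] + R[3]) % MOD
-- ===== Notes on version B (the rewrite author's own statement) =====
-- stated objective: faster
-- what changed: Replaced the O(n) dp-array loop with binary matrix exponentiation of the 4-term recurrence's companion matrix mod 1009.
import Mathlib
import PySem

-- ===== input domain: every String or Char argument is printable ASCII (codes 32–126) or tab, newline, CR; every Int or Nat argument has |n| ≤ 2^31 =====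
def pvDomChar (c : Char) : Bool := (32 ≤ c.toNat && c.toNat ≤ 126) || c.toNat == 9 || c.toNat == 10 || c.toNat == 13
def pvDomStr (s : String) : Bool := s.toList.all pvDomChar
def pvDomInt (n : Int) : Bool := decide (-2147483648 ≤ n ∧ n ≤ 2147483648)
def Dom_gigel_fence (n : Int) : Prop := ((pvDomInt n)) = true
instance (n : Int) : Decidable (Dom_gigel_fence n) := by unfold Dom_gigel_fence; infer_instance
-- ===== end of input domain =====

-- B replaces A's O(n) dp-array loop by binary exponentiation of the recurrence's
-- 4x4 companion matrix mod 1009 (O(log n)); same return value for every int n.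

-- ===== PORT A =====
def gigel_fence (n : Int) : Int :=
  if n ≤ 3 then 1
  else if n = 4 then 2
  else
    -- dp = [0] * (n + 1); dp[1] = dp[2] = dp[3] = 1; dp[4] = 2
    let dp := PySem.List.pyRepeat [(0 : Int)] (n + 1)
    let dp := PySem.List.pySetD dp 1 1
    let dp := PySem.List.pySetD dp 2 1
    let dp := PySem.List.pySetD dp 3 1
    let dp := PySem.List.pySetD dp 4 2
    -- for i in range(5, n + 1): dp[i] = (dp[i-1] + dp[i-4]) % 1009
    let dp := (PySem.List.pyRange 5 (n + 1) 1).foldl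
      (fun dp i =>
        PySem.List.pySetD dp i
          (PySem.Int.mod (PySem.List.pyGetD dp (i - 1) 0 + PySem.List.pyGetD dp (i - 4) 0) 1009))
      dp
    PySem.List.pyGetD dp n 0

-- ===== PORT B =====
-- a flat row-major 4x4 integer matrix, as Source B's 16-tuple
structure Mat4 where
  a00 : Int
  a01 : Int
  a02 : Int
  a03 : Int
  a10 : Int
  a11 : Int
  a12 : Int
  a13 : Int
  a20 : Int
  a21 : Int
  a22 : Int
  a23 : Int
  a30 : Int
  a31 : Int
  a32 : Int
  a33 : Int
deriving DecidableEq, Repr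

-- Source B's mul: 4x4 matrix product, every entry reduced mod 1009
def mulM (X Y : Mat4) : Mat4 :=
  ⟨PySem.Int.mod (X.a00*Y.a00 + X.a01*Y.a10 + X.a02*Y.a20 + X.a03*Y.a30) 1009,
   PySem.Int.mod (X.a00*Y.a01 + X.a01*Y.a11 + X.a02*Y.a21 + X.a03*Y.a31) 1009,
   PySem.Int.mod (X.a00*Y.a02 + X.a01*Y.a12 + X.a02*Y.a22 + X.a03*Y.a32) 1009,
   PySem.Int.mod (X.a00*Y.a03 + X.a01*Y.a13 + X.a02*Y.a23 + X.a03*Y.a33) 1009,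
   PySem.Int.mod (X.a10*Y.a00 + X.a11*Y.a10 + X.a12*Y.a20 + X.a13*Y.a30) 1009,
   PySem.Int.mod (X.a10*Y.a01 + X.a11*Y.a11 + X.a12*Y.a21 + X.a13*Y.a31) 1009,
   PySem.Int.mod (X.a10*Y.a02 + X.a11*Y.a12 + X.a12*Y.a22 + X.a13*Y.a32) 1009,
   PySem.Int.mod (X.a10*Y.a03 + X.a11*Y.a13 + X.a12*Y.a23 + X.a13*Y.a33) 1009,
   PySem.Int.mod (X.a20*Y.a00 + X.a21*Y.a10 + X.a22*Y.a20 + X.a23*Y.a30) 1009,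
   PySem.Int.mod (X.a20*Y.a01 + X.a21*Y.a11 + X.a22*Y.a21 + X.a23*Y.a31) 1009,
   PySem.Int.mod (X.a20*Y.a02 + X.a21*Y.a12 + X.a22*Y.a22 + X.a23*Y.a32) 1009,
   PySem.Int.mod (X.a20*Y.a03 + X.a21*Y.a13 + X.a22*Y.a23 + X.a23*Y.a33) 1009,
   PySem.Int.mod (X.a30*Y.a00 + X.a31*Y.a10 + X.a32*Y.a20 + X.a33*Y.a30) 1009,
   PySem.Int.mod (X.a30*Y.a01 + X.a31*Y.a11 + X.a32*Y.a21 + X.a33*Y.a31) 1009,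
   PySem.Int.mod (X.a30*Y.a02 + X.a31*Y.a12 + X.a32*Y.a22 + X.a33*Y.a32) 1009,
   PySem.Int.mod (X.a30*Y.a03 + X.a31*Y.a13 + X.a32*Y.a23 + X.a33*Y.a33) 1009⟩

-- Source B's while loop: e & 1 = e % 2, e >>= 1 = e / 2 (e is a nonnegative int there)
def powLoop (e : Nat) (R M : Mat4) : Mat4 :=
  if h : e = 0 then R
  else powLoop (e / 2) (if e % 2 = 1 then mulM R M else R) (mulM M M)
termination_by e
decreasing_by exact Nat.div_lt_self (Nat.pos_of_ne_zero h) one_lt_two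

def gigel_fence_alt (n : Int) : Int :=
  if n ≤ 3 then 1
  else if n = 4 then 2
  else
    let M : Mat4 := ⟨1,0,0,1, 1,0,0,0, 0,1,0,0, 0,0,1,0⟩
    let R : Mat4 := ⟨1,0,0,0, 0,1,0,0, 0,0,1,0, 0,0,0,1⟩
    let R := powLoop (n - 4).toNat R M
    PySem.Int.mod (R.a00 * 2 + R.a01 + R.a02 + R.a03) 1009

-- ===== PRECONDITION & SPEC =====
def Spec_gigel_fence (n : Int) (out : Int) : Prop := out = gigel_fence_alt n
instance (n : Int) (out : Int) : Decidable (Spec_gigel_fence n out) := by unfold Spec_gigel_fence; infer_instance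

-- ===== CLAIM (what is proved, stated in full; the proofs are below) =====
def Claim_equal_gigel_fence : Prop := ∀ (n : Int), Dom_gigel_fence n → Spec_gigel_fence n (gigel_fence n)

-- ===== LEMMAS AND PROOFS =====

lemma cast_emod (a : Int) : (((a % 1009 : Int)) : ZMod 1009) = (a : ZMod 1009) := by
  exact_mod_cast ZMod.intCast_mod a 1009
def psi (X : Mat4) : Matrix (Fin 4) (Fin 4) (ZMod 1009) :=
  !![(X.a00 : ZMod 1009), X.a01, X.a02, X.a03;
     X.a10, X.a11, X.a12, X.a13;
     X.a20, X.a21, X.a22, X.a23;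
     X.a30, X.a31, X.a32, X.a33]

set_option maxHeartbeats 4000000 in
lemma psi_mul (X Y : Mat4) : psi (mulM X Y) = psi X * psi Y := by
  ext i j
  fin_cases i <;> fin_cases j
  all_goals simp [psi, mulM, Matrix.mul_apply, Fin.sum_univ_four, cast_emod]

def g : Nat → Int
  | 0 => 0
  | 1 => 1
  | 2 => 1
  | 3 => 1
  | 4 => 2
  | k + 5 => PySem.Int.mod (g (k + 4) + g (k + 1)) 1009

lemma psi_powLoop (e : Nat) : ∀ R M : Mat4, psi (powLoop e R M) = psi R * psi M ^ e := by
  induction e using Nat.strong_induction_on with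
  | _ e ih =>
    intro R M
    rw [powLoop]
    by_cases h : e = 0
    · simp [h]
    · have hlt : e / 2 < e := Nat.div_lt_self (Nat.pos_of_ne_zero h) one_lt_two
      rw [dif_neg h, ih _ hlt, show psi (mulM M M) = psi M * psi M from psi_mul M M]
      have hsplit : psi M ^ (e % 2) * (psi M * psi M) ^ (e / 2) = psi M ^ e := by
        rw [← pow_two, ← pow_mul, ← pow_add]
        congr 1
        omega
      rcases Nat.mod_two_eq_zero_or_one e with h2 | h2
      · rw [h2, pow_zero, one_mul] at hsplit
        rw [if_neg (by omega), hsplit]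
      · rw [h2, pow_one] at hsplit
        rw [if_pos h2, psi_mul, mul_assoc, hsplit]

def vg (k : Nat) : Fin 4 → ZMod 1009 :=
  ![((g (k + 4) : Int) : ZMod 1009), ((g (k + 3) : Int) : ZMod 1009),
    ((g (k + 2) : Int) : ZMod 1009), ((g (k + 1) : Int) : ZMod 1009)]

def Mc : Mat4 := ⟨1,0,0,1, 1,0,0,0, 0,1,0,0, 0,0,1,0⟩
def Ic : Mat4 := ⟨1,0,0,0, 0,1,0,0, 0,0,1,0, 0,0,0,1⟩

lemma psi_Ic : psi Ic = 1 := by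
  ext i j; fin_cases i <;> fin_cases j <;> simp [psi, Ic]

lemma Mc_step (k : Nat) : Matrix.mulVec (psi Mc) (vg k) = vg (k + 1) := by
  funext i
  fin_cases i <;>
    simp [psi, Mc, vg, Matrix.mulVec, dotProduct, Fin.sum_univ_four]
  · rw [show g (k + 1 + 4) = PySem.Int.mod (g (k + 4) + g (k + 1)) 1009 from rfl,
      PySem.Int.mod_eq_emod_of_pos (by norm_num), cast_emod]
    push_cast; ring

lemma Mc_pow_vec (e : Nat) : ∀ k, Matrix.mulVec (psi Mc ^ e) (vg k) = vg (k + e) := by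
  induction e with
  | zero => intro k; simp [Matrix.one_mulVec]
  | succ m ih =>
    intro k
    rw [pow_succ, ← Matrix.mulVec_mulVec, Mc_step, ih]
    congr 1
    omega

lemma B_loop_value (e : Nat) :
    (((powLoop e Ic Mc).a00 * 2 + (powLoop e Ic Mc).a01 + (powLoop e Ic Mc).a02 +
        (powLoop e Ic Mc).a03 : Int) : ZMod 1009) = ((g (e + 4) : Int) : ZMod 1009) := by
  have h := psi_powLoop e Ic Mc
  rw [psi_Ic, one_mul] at h
  have hv := congrFun (Mc_pow_vec e 0) 0
  rw [← h] at hv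
  have h4 : g 4 = 2 := rfl
  have h3 : g 3 = 1 := rfl
  have h2 : g 2 = 1 := rfl
  have h1 : g 1 = 1 := rfl
  simp [psi, vg, Matrix.mulVec, dotProduct, Fin.sum_univ_four, h4, h3, h2, h1] at hv
  push_cast
  rw [← hv]

lemma int_eq_of_cast (a b : Int) (ha0 : 0 ≤ a) (ha : a < 1009) (hb0 : 0 ≤ b) (hb : b < 1009)
    (h : (a : ZMod 1009) = (b : ZMod 1009)) : a = b := by
  have := (ZMod.intCast_eq_intCast_iff a b 1009).mp h
  have hmod : a % (1009 : Int) = b % (1009 : Int) := this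
  rwa [Int.emod_eq_of_lt ha0 ha, Int.emod_eq_of_lt hb0 hb] at hmod

lemma g_bounds (k : Nat) (h : 5 ≤ k) : 0 ≤ g k ∧ g k < 1009 := by
  obtain ⟨m, rfl⟩ : ∃ m, k = m + 5 := ⟨k - 5, by omega⟩
  rw [show g (m + 5) = PySem.Int.mod (g (m + 4) + g (m + 1)) 1009 from rfl,
    PySem.Int.mod_eq_emod_of_pos (by norm_num)]
  exact ⟨Int.emod_nonneg _ (by norm_num), Int.emod_lt_of_pos _ (by norm_num)⟩

lemma B_eq_g (n : Int) (h : ¬ n ≤ 3) (h4 : ¬ n = 4) : gigel_fence_alt n = g n.toNat := by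
  have hn5 : (5 : Int) ≤ n := by omega
  have hN : 5 ≤ n.toNat := by omega
  have he : (n - 4).toNat + 4 = n.toNat := by omega
  unfold gigel_fence_alt
  rw [if_neg h, if_neg h4]
  rw [PySem.Int.mod_eq_emod_of_pos (by norm_num)]
  apply int_eq_of_cast
  · exact Int.emod_nonneg _ (by norm_num)
  · exact Int.emod_lt_of_pos _ (by norm_num)
  · exact (g_bounds _ hN).1
  · exact (g_bounds _ hN).2
  · rw [cast_emod]
    have := B_loop_value (n - 4).toNat
    rw [he] at this
    exact this

def FN (dp : List Int) (k : Nat) : List Int :=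
  dp.set (5 + k) (PySem.Int.mod (dp.getD (4 + k) 0 + dp.getD (1 + k) 0) 1009)

lemma getD_set_self (l : List Int) (i : Nat) (v : Int) (h : i < l.length) :
    (l.set i v).getD i 0 = v := by
  simp [List.getD, h]

lemma getD_set_ne (l : List Int) (i j : Nat) (v : Int) (h : j ≠ i) :
    (l.set i v).getD j 0 = l.getD j 0 := by
  simp [List.getD, List.getElem?_set_ne (by omega : i ≠ j)]

lemma inv (N : Nat) : ∀ (c m : Nat) (dp : List Int), dp.length = N + 1 → 5 + m + c ≤ N + 1 →
    (∀ j, j ≤ 4 + m → dp.getD j 0 = g j) →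
    ((List.range' m c).foldl FN dp).length = N + 1 ∧
    (∀ j, j ≤ 4 + m + c → ((List.range' m c).foldl FN dp).getD j 0 = g j) := by
  intro c
  induction c with
  | zero =>
    intro m dp hlen _ hg
    exact ⟨hlen, fun j hj => hg j (by omega)⟩
  | succ c ih =>
    intro m dp hlen hb hg
    rw [List.range'_succ, List.foldl_cons]
    have h5m : 5 + m < dp.length := by omega
    have hstep : ∀ j, j ≤ 4 + (m + 1) → (FN dp m).getD j 0 = g j := by
      intro j hj
      unfold FN
      by_cases hj5 : j = 5 + m
      · rw [hj5, getD_set_self _ _ _ h5m, hg (4 + m) (by omega), hg (1 + m) (by omega)]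
        rw [show 5 + m = m + 5 from by omega]
        rw [show (4 : Nat) + m = m + 4 from by omega, show (1 : Nat) + m = m + 1 from by omega]
        rfl
      · rw [getD_set_ne _ _ _ _ hj5]
        exact hg j (by omega)
    have := ih (m + 1) (FN dp m) (by simp [FN, hlen]) (by omega) hstep
    exact ⟨this.1, fun j hj => this.2 j (by omega)⟩

lemma getD_replicate (n j : Nat) : (List.replicate n (0 : Int)).getD j 0 = 0 := by
  simp [List.getD, List.getElem?_replicate]
  split <;> rfl

lemma A_eq_g (n : Int) (h3 : ¬ n ≤ 3) (h4 : ¬ n = 4) : gigel_fence n = g n.toNat := by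
  have hn5 : (5 : Int) ≤ n := by omega
  set N := n.toNat with hNdef
  have hN : 5 ≤ N := by omega
  simp only [gigel_fence, if_neg h3, if_neg h4]
  -- initial dp
  rw [PySem.List.pyRepeat_singleton]
  have h1 : (n + 1).toNat = N + 1 := by omega
  rw [h1]
  rw [PySem.List.pySetD_of_nonneg (i := 1) _ _ (by norm_num),
    PySem.List.pySetD_of_nonneg (i := 2) _ _ (by norm_num),
    PySem.List.pySetD_of_nonneg (i := 3) _ _ (by norm_num),
    PySem.List.pySetD_of_nonneg (i := 4) _ _ (by norm_num)]
  rw [show Int.toNat 1 = 1 from by simp, show Int.toNat 2 = 2 from by simp,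
    show Int.toNat 3 = 3 from by simp, show Int.toNat 4 = 4 from by simp]
  -- the loop
  rw [PySem.List.pyRange_one]
  have h2 : (n + 1 - 5).toNat = N - 4 := by omega
  rw [h2, List.foldl_map]
  have hbody : (fun (dp : List Int) (k : Nat) =>
      PySem.List.pySetD dp (5 + (k : Int))
        (PySem.Int.mod (PySem.List.pyGetD dp (5 + (k : Int) - 1) 0 +
          PySem.List.pyGetD dp (5 + (k : Int) - 4) 0) 1009)) = FN := by
    funext dp k
    rw [show (5 : Int) + (k : Int) - 1 = ((4 + k : Nat) : Int) from by push_cast; ring,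
      show (5 : Int) + (k : Int) - 4 = ((1 + k : Nat) : Int) from by push_cast; ring,
      show (5 : Int) + (k : Int) = ((5 + k : Nat) : Int) from by push_cast; ring]
    rw [PySem.List.pyGetD_natCast, PySem.List.pyGetD_natCast, PySem.List.pySetD_natCast]
    rfl
  rw [hbody, List.range_eq_range']
  -- final read: n = ↑N
  rw [show n = ((N : Nat) : Int) from by omega]
  rw [PySem.List.pyGetD_natCast]
  -- initial dp facts
  set dp0 := ((((List.replicate (N + 1) (0 : Int)).set 1 1).set 2 1).set 3 1).set 4 2 with hdp0
  have hlen0 : dp0.length = N + 1 := by simp [hdp0]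
  have hg0 : ∀ j, j ≤ 4 + 0 → dp0.getD j 0 = g j := by
    intro j hj
    interval_cases j
    · rw [hdp0, getD_set_ne _ _ _ _ (by omega), getD_set_ne _ _ _ _ (by omega),
        getD_set_ne _ _ _ _ (by omega), getD_set_ne _ _ _ _ (by omega), getD_replicate]
      rfl
    · rw [hdp0, getD_set_ne _ _ _ _ (by omega), getD_set_ne _ _ _ _ (by omega),
        getD_set_ne _ _ _ _ (by omega), getD_set_self _ _ _ (by simp; omega)]
      rfl
    · rw [hdp0, getD_set_ne _ _ _ _ (by omega), getD_set_ne _ _ _ _ (by omega),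
        getD_set_self _ _ _ (by simp; omega)]
      rfl
    · rw [hdp0, getD_set_ne _ _ _ _ (by omega), getD_set_self _ _ _ (by simp; omega)]
      rfl
    · rw [hdp0, getD_set_self _ _ _ (by simp; omega)]
      rfl
  exact (inv N (N - 4) 0 dp0 hlen0 (by omega) hg0).2 N (by omega)

-- ===== VERDICT (by name: the statement is the Claim_ definition above) =====
theorem gigel_fence_spec : Claim_equal_gigel_fence := by
  intro n _
  unfold Spec_gigel_fence
  by_cases h3 : n ≤ 3
  · simp [gigel_fence, gigel_fence_alt, h3]
  · by_cases h4 : n = 4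
    · simp [gigel_fence, gigel_fence_alt, h4]
    · rw [A_eq_g n h3 h4, B_eq_g n h3 h4]
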